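-- pv_equiv track=rewrite | github.com/Leiner117/snake | deep_search.py | depth_first_search_aux
-- ===== SOURCE A (Python) =====
-- from functools import reduce
--
-- def member(ele, lst):
--     """
--     Check if an element exists in a list.
--
--     Args:
--     ele: The element to check.
--     lst: The list to search.
--
--     Returns:
--     True if the element exists in the list, otherwise False.
--     """
--     return any(filter(lambda x: x == ele, lst))
--
-- def remove_if(fun, lst):
--     """
--     Remove elements from a list based on a given condition.
--
--     Args:
--     fun: The condition function.
--     lst: The list to filter.
--
--     Returns:
--     A new list with elements filtered out based on the condition.
--     """
--     return list(filter(lambda x: not fun(x), lst))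
--
-- def neighbors(node, obstacles, end):
--     """
--     Find neighboring coordinates of a given node.
--
--     Args:
--     node: The current coordinate.
--     obstacles: List of obstacle coordinates.
--     end: The target coordinate.
--
--     Returns:
--     A list of neighboring coordinates sorted by their proximity to the target.
--     """
--     x, y = node
--     neighbours = [(x+1, y), (x-1, y), (x, y+1), (x, y-1)]
--     valid_neighbours = list(filter(lambda coord: 0 <= coord[0] < 18 and 0 <= coord[1] < 20 and coord[0] >= 0 and coord[1] >= 0 and coord not in obstacles, neighbours))
--     sorted_neighbours = sorted(valid_neighbours, key=lambda coord: abs(coord[0] - end[0]) + abs(coord[1] - end[1]))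
--     return sorted_neighbours
--
-- def extend(path, obstacles, visited, end):
--     """
--     Extend a path to neighboring coordinates.
--
--     Args:
--     path: The current path.
--     obstacles: List of obstacle coordinates.
--     visited: Set of visited coordinates.
--     end: The target coordinate.
--
--     Returns:
--     A list of extended paths.
--     """
--     return remove_if(lambda x: member(x, path) or member(x, visited), neighbors(path[-1], obstacles, end))
--
-- def depth_first_search_aux(end, paths, obstacles, visited):
--     """
--     Auxiliary function for depth-first search.
--
--     Args:
--     end: The target coordinate.
--     paths: List of current paths.
--     obstacles: List of obstacle coordinates.
--     visited: Set of visited coordinates.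
--
--     Returns:
--     The path from start to end if found, otherwise None.
--     """
--     if not paths:
--         return None  # No valid path found
--     elif end == paths[0][-1]:
--         return list(reversed(paths[0]))  # Found a valid path
--     else:
--         new_paths = reduce(lambda acc, path: acc + [path + (neighbor,) for neighbor in extend(path, obstacles, visited, end)], paths, [])
--         if not new_paths:
--             return None  # No new paths available
--         new_visited = visited.union(reduce(lambda acc, path: acc.union({path[-1]}), new_paths, set()))
--         best_path = min(new_paths, key=lambda path: sum(map(lambda coord: abs(coord[0] - end[0]) + abs(coord[1] - end[1]), path)))
--         return depth_first_search_aux(end, [best_path], obstacles, new_visited)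
-- ===== SOURCE B (Python) =====
-- def depth_first_search_aux(end, paths, obstacles, visited):
--     """Iterative greedy deepening: same per-step selection as the recursive
--     original, expressed as a while-loop over (paths, visited) state."""
--     ex, ey = end
--     def dist(c):
--         return abs(c[0] - ex) + abs(c[1] - ey)
--     visited = set(visited)
--     while paths:
--         head = paths[0]
--         if head[-1] == end:
--             return list(reversed(head))
--         new_paths = []
--         for path in paths:
--             x, y = path[-1]
--             cand = [(x + 1, y), (x - 1, y), (x, y + 1), (x, y - 1)]
--             cand = [c for c in cand
--                     if 0 <= c[0] < 18 and 0 <= c[1] < 20 and c not in obstacles]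
--             cand.sort(key=dist)
--             for n in cand:
--                 if n not in path and n not in visited:
--                     new_paths.append(path + (n,))
--         if not new_paths:
--             return None
--         visited |= {p[-1] for p in new_paths}
--         paths = [min(new_paths, key=lambda p: sum(map(dist, p)))]
--     return None
-- ===== Notes on version B (the rewrite author's own statement) =====
-- stated objective: faster
-- what changed: The recursive greedy search becomes an iterative while-loop over the (paths, visited) state, with the member/remove_if/neighbors/extend helper chain inlined into one filtered-candidate loop; membership tests use tuple/set 'in' instead of any(filter(...)) scans and the reduce-of-unions visited update becomes a single set augmentation.
import Mathlib
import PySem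

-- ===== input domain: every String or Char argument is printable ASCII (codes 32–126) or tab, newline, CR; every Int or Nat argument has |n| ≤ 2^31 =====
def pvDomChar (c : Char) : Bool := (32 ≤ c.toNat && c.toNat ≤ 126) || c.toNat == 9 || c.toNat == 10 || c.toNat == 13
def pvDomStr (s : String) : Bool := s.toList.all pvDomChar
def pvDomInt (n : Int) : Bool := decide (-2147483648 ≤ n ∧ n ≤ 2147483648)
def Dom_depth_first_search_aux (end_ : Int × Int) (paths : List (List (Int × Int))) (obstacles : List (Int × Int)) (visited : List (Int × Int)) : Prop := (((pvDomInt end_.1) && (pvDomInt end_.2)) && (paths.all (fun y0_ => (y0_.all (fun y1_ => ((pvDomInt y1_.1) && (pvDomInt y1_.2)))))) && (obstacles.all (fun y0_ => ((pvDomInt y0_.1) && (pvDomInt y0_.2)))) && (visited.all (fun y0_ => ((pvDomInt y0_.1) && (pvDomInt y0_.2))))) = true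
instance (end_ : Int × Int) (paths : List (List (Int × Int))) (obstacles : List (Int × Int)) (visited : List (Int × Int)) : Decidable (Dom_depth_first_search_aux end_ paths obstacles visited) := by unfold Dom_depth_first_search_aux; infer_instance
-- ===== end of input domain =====

-- B replaces the recursive greedy search by an iterative while-loop over the (paths, visited)
-- state with the helper chain (member/remove_if/neighbors/extend) inlined; same return values.
-- The equivalence is about return values; neither program mutates its arguments observably
-- (B rebinds local names only).

-- ===== PORT A =====
-- path[-1]; total form (Pre_ excludes the empty paths on which Python raises IndexError)
def pvLast (p : List (Int × Int)) : Int × Int := (PySem.List.pyGet? p (-1)).getD (0, 0)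

-- member: any(filter(lambda x: x == ele, lst)); every kept element is a pair, hence truthy,
-- so any() is exactly "the filtered list is nonempty"
def pvMember (ele : Int × Int) (lst : List (Int × Int)) : Bool :=
  !((lst.filter (fun x => x == ele)).isEmpty)

def pvRemoveIf (f : Int × Int → Bool) (lst : List (Int × Int)) : List (Int × Int) :=
  lst.filter (fun x => !(f x))

def pvNeighbors (node : Int × Int) (obstacles : List (Int × Int)) (end_ : Int × Int) :
    List (Int × Int) :=
  let neighbours : List (Int × Int) :=
    [(node.1 + 1, node.2), (node.1 - 1, node.2), (node.1, node.2 + 1), (node.1, node.2 - 1)]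
  let valid := neighbours.filter (fun c =>
    decide (0 ≤ c.1) && decide (c.1 < 18) && decide (0 ≤ c.2) && decide (c.2 < 20) &&
    decide (0 ≤ c.1) && decide (0 ≤ c.2) && !(obstacles.contains c))
  PySem.List.sorted valid (fun c => |c.1 - end_.1| + |c.2 - end_.2|) false

def pvExtend (path : List (Int × Int)) (obstacles : List (Int × Int))
    (visited : List (Int × Int)) (end_ : Int × Int) : List (Int × Int) :=
  pvRemoveIf (fun x => pvMember x path || pvMember x visited)
    (pvNeighbors (pvLast path) obstacles end_)

-- the recursion, with a fuel counter making it structural; each recursive call extends the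
-- selected path by a fresh in-grid cell, so on the 18×20 grid the Python recursion depth
-- never exceeds 362 and fuel 400 is never exhausted on inputs Pre_ admits
def pvDfsA (fuel : Nat) (end_ : Int × Int) (paths : List (List (Int × Int)))
    (obstacles : List (Int × Int)) (visited : List (Int × Int)) : Option (List (Int × Int)) :=
  match fuel with
  | 0 => none
  | fuel + 1 =>
    if paths.isEmpty then none
    else if end_ == pvLast (paths.headD []) then some (paths.headD []).reverse
    else
      let new_paths := paths.foldl
        (fun acc path => acc ++ (pvExtend path obstacles visited end_).map (fun n => path ++ [n])) []
      if new_paths.isEmpty then none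
      else
        let new_visited := PySem.Set.union visited
          (new_paths.foldl (fun s p => PySem.Set.union s [pvLast p]) PySem.Set.empty)
        let best := (PySem.List.min? new_paths
          (fun p => (p.map (fun c => |c.1 - end_.1| + |c.2 - end_.2|)).sum)).getD []
        pvDfsA fuel end_ [best] obstacles new_visited

def depth_first_search_aux (end_ : Int × Int) (paths : List (List (Int × Int))) (obstacles : List (Int × Int)) (visited : List (Int × Int)) : Option (List (Int × Int)) :=
  pvDfsA 400 end_ paths obstacles visited

-- ===== PORT B =====
-- B's path[-1] accessor (same total form; Pre_ excludes the raising inputs)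
def pvLastB (p : List (Int × Int)) : Int × Int := (PySem.List.pyGet? p (-1)).getD (0, 0)

def pvDist (end_ : Int × Int) (c : Int × Int) : Int := |c.1 - end_.1| + |c.2 - end_.2|

-- the candidate neighbours of (x, y): filtered then sorted in place by dist
def pvCand (end_ : Int × Int) (obstacles : List (Int × Int)) (x y : Int) : List (Int × Int) :=
  PySem.List.sorted
    (([(x + 1, y), (x - 1, y), (x, y + 1), (x, y - 1)] : List (Int × Int)).filter (fun c =>
      decide (0 ≤ c.1) && decide (c.1 < 18) && decide (0 ≤ c.2) && decide (c.2 < 20) &&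
      !(obstacles.contains c)))
    (pvDist end_) false

-- the while-loop, one constructor per iteration (fuel as above)
def pvLoopB (fuel : Nat) (end_ : Int × Int) (paths : List (List (Int × Int)))
    (obstacles : List (Int × Int)) (visited : List (Int × Int)) : Option (List (Int × Int)) :=
  match fuel with
  | 0 => none
  | fuel + 1 =>
    match paths with
    | [] => none
    | head :: _ =>
      if pvLastB head == end_ then some head.reverse
      else
        let new_paths := paths.foldl (fun acc path =>
          (pvCand end_ obstacles (pvLastB path).1 (pvLastB path).2).foldl
            (fun acc2 n =>
              if !(path.contains n) && !(visited.contains n) then acc2 ++ [path ++ [n]]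
              else acc2) acc) []
        if new_paths.isEmpty then none
        else
          let visited' := new_paths.foldl (fun s p => PySem.Set.add s (pvLastB p)) visited
          let best := (PySem.List.min? new_paths (fun p => (p.map (pvDist end_)).sum)).getD []
          pvLoopB fuel end_ [best] obstacles visited'

def depth_first_search_aux_alt (end_ : Int × Int) (paths : List (List (Int × Int))) (obstacles : List (Int × Int)) (visited : List (Int × Int)) : Option (List (Int × Int)) :=
  pvLoopB 400 end_ paths obstacles visited

-- ===== PRECONDITION & SPEC =====
-- Pre_ excludes exactly the inputs on which Python A raises IndexError: a nonempty paths list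
-- whose first path is the empty tuple, or whose first path does not already end at end_ while
-- some later path is empty (its last element is then demanded by extend).
def Pre_depth_first_search_aux (end_ : Int × Int) (paths : List (List (Int × Int))) (obstacles : List (Int × Int)) (visited : List (Int × Int)) : Prop :=
  match paths with
  | [] => True
  | p0 :: rest => p0 ≠ [] ∧ (p0.getLast? = some end_ ∨ ∀ p ∈ rest, p ≠ [])
instance (end_ : Int × Int) (paths : List (List (Int × Int))) (obstacles : List (Int × Int)) (visited : List (Int × Int)) : Decidable (Pre_depth_first_search_aux end_ paths obstacles visited) := by unfold Pre_depth_first_search_aux; cases paths <;> infer_instance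

def pvWitness_depth_first_search_aux : (Int × Int) × (List (List (Int × Int))) × (List (Int × Int)) × (List (Int × Int)) :=
  ((1, 1), [[(0, 1), (1, 1)]], [(2, 1)], [(0, 0)])

def Spec_depth_first_search_aux (end_ : Int × Int) (paths : List (List (Int × Int))) (obstacles : List (Int × Int)) (visited : List (Int × Int)) (out : Option (List (Int × Int))) : Prop := out = depth_first_search_aux_alt end_ paths obstacles visited
instance (end_ : Int × Int) (paths : List (List (Int × Int))) (obstacles : List (Int × Int)) (visited : List (Int × Int)) (out : Option (List (Int × Int))) : Decidable (Spec_depth_first_search_aux end_ paths obstacles visited out) := by unfold Spec_depth_first_search_aux; infer_instance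

-- ===== CLAIM (what is proved, stated in full; the proofs are below) =====
def Claim_equal_depth_first_search_aux : Prop := ∀ (end_ : Int × Int) (paths : List (List (Int × Int))) (obstacles : List (Int × Int)) (visited : List (Int × Int)), Dom_depth_first_search_aux end_ paths obstacles visited → Pre_depth_first_search_aux end_ paths obstacles visited → Spec_depth_first_search_aux end_ paths obstacles visited (depth_first_search_aux end_ paths obstacles visited)

-- ===== LEMMAS AND PROOFS =====

-- the two last-element helpers are the same function
theorem pvLastB_eq : pvLastB = pvLast := rfl

-- member is list membership (the filtered elements are pairs, hence truthy)
theorem pvMember_eq_contains (x : Int × Int) (l : List (Int × Int)) :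
    pvMember x l = l.contains x := by
  induction l with
  | nil => rfl
  | cons a t ih =>
    by_cases h : a = x
    · simp [pvMember, h]
    · simpa [pvMember, List.filter_cons, h, bne, beq_iff_eq, Ne.symm h] using ih

-- A's neighbour list (with its redundant 0 ≤ · conjuncts) is B's candidate list
theorem pvNeighbors_eq_pvCand (node : Int × Int) (obstacles : List (Int × Int))
    (end_ : Int × Int) :
    pvNeighbors node obstacles end_ = pvCand end_ obstacles node.1 node.2 := by
  have hfilter :
      ([(node.1 + 1, node.2), (node.1 - 1, node.2), (node.1, node.2 + 1), (node.1, node.2 - 1)] :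
          List (Int × Int)).filter (fun c =>
        decide (0 ≤ c.1) && decide (c.1 < 18) && decide (0 ≤ c.2) && decide (c.2 < 20) &&
        decide (0 ≤ c.1) && decide (0 ≤ c.2) && !(obstacles.contains c)) =
      ([(node.1 + 1, node.2), (node.1 - 1, node.2), (node.1, node.2 + 1), (node.1, node.2 - 1)] :
          List (Int × Int)).filter (fun c =>
        decide (0 ≤ c.1) && decide (c.1 < 18) && decide (0 ≤ c.2) && decide (c.2 < 20) &&
        !(obstacles.contains c)) := by
    apply List.filter_congr
    intro c _
    by_cases h1 : (0 : Int) ≤ c.1 <;> by_cases h2 : c.1 < 18 <;>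
      by_cases h3 : (0 : Int) ≤ c.2 <;> by_cases h4 : c.2 < 20 <;>
        simp [h1, h2, h3, h4]
  exact congrArg (fun l => PySem.List.sorted l (pvDist end_) false) hfilter

-- extend is a single filter over B's candidate list
theorem pvExtend_eq_filter (path obstacles visited : List (Int × Int)) (end_ : Int × Int) :
    pvExtend path obstacles visited end_ =
      (pvCand end_ obstacles (pvLast path).1 (pvLast path).2).filter
        (fun n => !(path.contains n) && !(visited.contains n)) := by
  unfold pvExtend pvRemoveIf
  rw [pvNeighbors_eq_pvCand]
  apply List.filter_congr
  intro c _
  simp [pvMember_eq_contains]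

-- the two visited updates coincide: first collecting the new last cells into a fresh set and
-- unioning it in (A) is folding them into visited one by one (B)
theorem pvUpdate_ofList (v : PySem.Set (Int × Int)) (xs : List (Int × Int)) :
    PySem.Set.update v (PySem.Set.ofList xs) = PySem.Set.update v xs := by
  induction xs using List.reverseRecOn with
  | nil => rfl
  | append_singleton xs x ih =>
    rw [PySem.Set.ofList_append_singleton, PySem.Set.update_append,
      PySem.Set.update_cons, PySem.Set.update_nil]
    by_cases h : x ∈ PySem.Set.ofList xs
    · rw [PySem.Set.add_of_mem h, ih]
      have hx : x ∈ PySem.Set.update v xs := by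
        rw [PySem.Set.mem_update]
        exact Or.inr ((PySem.Set.mem_ofList xs x).mp h)
      exact (PySem.Set.add_of_mem hx).symm
    · rw [PySem.Set.add_of_not_mem h, PySem.Set.update_append, PySem.Set.update_cons,
        PySem.Set.update_nil, ih]

theorem pvVisited_eq (visited : List (Int × Int)) (new_paths : List (List (Int × Int))) :
    PySem.Set.union visited
        (new_paths.foldl (fun s p => PySem.Set.union s [pvLast p]) PySem.Set.empty) =
      new_paths.foldl (fun s p => PySem.Set.add s (pvLast p)) visited := by
  have h1 : ∀ (s : PySem.Set (Int × Int)) (p : List (Int × Int)),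
      PySem.Set.union s [pvLast p] = PySem.Set.add s (pvLast p) := by
    intro s p
    show PySem.Set.update s [pvLast p] = _
    rw [PySem.Set.update_cons, PySem.Set.update_nil]
  have h2 : new_paths.foldl (fun s p => PySem.Set.union s [pvLast p]) PySem.Set.empty =
      PySem.Set.ofList (new_paths.map pvLast) := by
    rw [show (PySem.Set.ofList (new_paths.map pvLast) : PySem.Set (Int × Int)) =
        PySem.Set.update PySem.Set.empty (new_paths.map pvLast) from rfl,
      PySem.Set.update_map_eq_foldl_add]
    exact (PySem.List.foldl_congr_mem new_paths _ _ _ (fun s p _ => h1 s p)).symm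
  rw [h2]
  show PySem.Set.update visited _ = _
  rw [pvUpdate_ofList, PySem.Set.update_map_eq_foldl_add]

-- one step: A's flatMap-style accumulation equals B's nested loop
theorem pvNewPaths_eq (end_ : Int × Int) (paths : List (List (Int × Int)))
    (obstacles visited : List (Int × Int)) :
    paths.foldl
        (fun acc path => acc ++ (pvExtend path obstacles visited end_).map (fun n => path ++ [n])) [] =
      paths.foldl (fun acc path =>
        (pvCand end_ obstacles (pvLast path).1 (pvLast path).2).foldl
          (fun acc2 n =>
            if !(path.contains n) && !(visited.contains n) then acc2 ++ [path ++ [n]]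
            else acc2) acc) [] := by
  apply PySem.List.foldl_congr_mem
  intro acc path _
  rw [PySem.List.foldl_append_if, pvExtend_eq_filter]

-- the main induction: the recursion and the loop agree at every fuel level
theorem pvDfsA_eq_pvLoopB (fuel : Nat) (end_ : Int × Int) (paths : List (List (Int × Int)))
    (obstacles visited : List (Int × Int)) :
    pvDfsA fuel end_ paths obstacles visited = pvLoopB fuel end_ paths obstacles visited := by
  induction fuel generalizing paths visited with
  | zero => rfl
  | succ fuel ih =>
    cases paths with
    | nil => rfl
    | cons head rest =>
      rw [pvDfsA, pvLoopB]
      simp only [List.isEmpty_cons, List.headD_cons, Bool.false_eq_true, if_false, pvLastB_eq]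
      rw [Bool.beq_comm (a := end_)]
      by_cases hend : (pvLast head == end_) = true
      · rw [if_pos hend, if_pos hend]
      · rw [if_neg hend, if_neg hend, ← pvNewPaths_eq, ← pvVisited_eq]
        by_cases hnp : ((head :: rest).foldl
            (fun acc path =>
              acc ++ (pvExtend path obstacles visited end_).map (fun n => path ++ [n])) []).isEmpty = true
        · rw [if_pos hnp, if_pos hnp]
        · rw [if_neg hnp, if_neg hnp]
          exact ih _ _

-- ===== VERDICT (by name: the statement is the Claim_ definition above) =====
theorem depth_first_search_aux_spec : Claim_equal_depth_first_search_aux := by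
  intro end_ paths obstacles visited _ _
  unfold Spec_depth_first_search_aux depth_first_search_aux depth_first_search_aux_alt
  exact pvDfsA_eq_pvLoopB 400 end_ paths obstacles visited
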